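-- pv_equiv track=rewrite | github.com/lucianogg/orexFIUPM | bin/filtro.py | removeTitle
-- ===== SOURCE A (Python) =====
-- def removeTitle(text):
--     i = 0
--     expr1 = "<h1 class=\"title\">"
--     expr2 = "</h1>"
--     while i < len(text):
--         if text[i:i+len(expr1)] == expr1:
--             j = i+len(expr1)
--             while j < len(text):
--                 if text[j:j+len(expr2)] == expr2:
--                     text = text[:i] + text[(j+len(expr2)):]
--                     return text
--                 j += 1
--         i += 1
--     return text
-- ===== SOURCE B (Python) =====
-- def removeTitle(text):
--     # One-pass KMP-style automaton: since the first character of each tag occurs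
--     # nowhere else in that tag, the failure function is trivial (restart at 1 on the
--     # tag's first character, else 0), so a
--     # single left-to-right pass with a match counter suffices; no backtracking,
--     # no slicing, no index search.
--     OPEN = "<h1 class=\"title\">"
--     CLOSE = "</h1>"
--     out = []       # chars kept so far (only written before/after the block)
--     k = 0          # length of the tag prefix currently matched
--     state = 0      # 0: looking for OPEN, 1: looking for CLOSE, 2: block removed
--     for c in text:
--         if state == 2:
--             out.append(c)
--         else:
--             pat = OPEN if state == 0 else CLOSE
--             if c == pat[k]:
--                 k += 1
--                 if k == len(pat):
--                     state += 1
--                     k = 0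
--             elif c == pat[0]:
--                 if state == 0:
--                     out.append(pat[:k])
--                 k = 1
--             else:
--                 if state == 0:
--                     out.append(pat[:k])
--                     out.append(c)
--                 k = 0
--     if state == 2:
--         return "".join(out)
--     return text
-- ===== Notes on version B (the rewrite author's own statement) =====
-- stated objective: alternative
-- what changed: Replaced A's nested backtracking scan (outer loop re-testing an 18-char slice at every index, inner loop re-testing a 5-char slice) with a single left-to-right character pass driven by a KMP-style automaton whose failure function is trivial because each tag's first character occurs nowhere else in that tag, so the text is traversed exactly once with a match counter and no slicing or backtracking.
import Mathlib
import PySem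

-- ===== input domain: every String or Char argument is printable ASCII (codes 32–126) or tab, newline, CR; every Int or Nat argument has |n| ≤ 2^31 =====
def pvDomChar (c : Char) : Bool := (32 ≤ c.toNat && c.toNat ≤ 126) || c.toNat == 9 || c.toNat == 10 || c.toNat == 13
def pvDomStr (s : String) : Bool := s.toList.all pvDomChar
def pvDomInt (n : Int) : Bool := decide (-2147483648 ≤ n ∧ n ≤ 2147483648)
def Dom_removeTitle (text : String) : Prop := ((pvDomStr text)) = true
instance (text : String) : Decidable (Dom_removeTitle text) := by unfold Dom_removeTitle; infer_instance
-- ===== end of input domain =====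

-- B replaces A's nested backtracking scan by a single left-to-right pass with a
-- KMP-style match counter (the failure function is trivial because each tag's first
-- character occurs nowhere else in that tag): a different algorithm, no backtracking.

-- ===== PORT A =====
-- the two literal tag strings, as character lists
def pvExpr1 : List Char := "<h1 class=\"title\">".toList
def pvExpr2 : List Char := "</h1>".toList

-- A's inner while loop: scans j upward; `some t` is the early `return text`, `none` is falling out
def pvAInner (cs : List Char) (i j : Nat) : Option (List Char) :=
  if _h : j < cs.length then
    if (cs.drop j).take pvExpr2.length = pvExpr2 then
      some (cs.take i ++ cs.drop (j + pvExpr2.length))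
    else pvAInner cs i (j + 1)
  else none
termination_by cs.length - j

-- A's outer while loop: `none` means the loop exhausted the string (A returns text unchanged)
def pvAOuter (cs : List Char) (i : Nat) : Option (List Char) :=
  if _h : i < cs.length then
    if (cs.drop i).take pvExpr1.length = pvExpr1 then
      match pvAInner cs i (i + pvExpr1.length) with
      | some t => some t
      | none => pvAOuter cs (i + 1)
    else pvAOuter cs (i + 1)
  else none
termination_by cs.length - i

def removeTitle (text : String) : String :=
  match pvAOuter text.toList 0 with
  | some t => t |> String.ofList
  | none => text

-- ===== PORT B =====
-- B's loop body: state = (out, k, st); st 0 = looking for OPEN, 1 = looking for CLOSE,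
-- 2 = block removed; k = length of tag prefix currently matched
def pvStep (s : List Char × Nat × Nat) (c : Char) : List Char × Nat × Nat :=
  match s with
  | (out, k, st) =>
    if st = 2 then (out ++ [c], k, 2)
    else
      let pat := if st = 0 then pvExpr1 else pvExpr2
      if c = pat.getD k ' ' then
        if k + 1 = pat.length then (out, 0, st + 1)
        else (out, k + 1, st)
      else if c = pat.getD 0 ' ' then
        ((if st = 0 then out ++ pat.take k else out), 1, st)
      else
        ((if st = 0 then out ++ pat.take k ++ [c] else out), 0, st)

def removeTitle_alt (text : String) : String :=
  let r := text.toList.foldl pvStep ([], 0, 0)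
  if r.2.2 = 2 then String.ofList r.1 else text

-- ===== PRECONDITION & SPEC =====
def Spec_removeTitle (text : String) (out : String) : Prop := out = removeTitle_alt text
instance (text : String) (out : String) : Decidable (Spec_removeTitle text out) := by unfold Spec_removeTitle; infer_instance

-- ===== CLAIM (what is proved, stated in full; the proofs are below) =====
def Claim_equal_removeTitle : Prop := ∀ (text : String), Dom_removeTitle text → Spec_removeTitle text (removeTitle text)

-- ===== LEMMAS AND PROOFS =====

theorem pvE1len : pvExpr1.length = 18 := by decide
theorem pvE2len : pvExpr2.length = 5 := by decide

-- ---------- A-side lemmas (characterise A's nested loops) ----------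

-- one step of A's inner loop when expr2 does not occur at j
theorem pvInner_miss (cs : List Char) (i j : Nat) (hj : j < cs.length)
    (hm : ¬ pvExpr2 <+: cs.drop j) : pvAInner cs i j = pvAInner cs i (j + 1) := by
  conv_lhs => rw [pvAInner]
  rw [dif_pos hj, if_neg (fun heq => hm (List.prefix_iff_eq_take.2 heq.symm))]

-- one step of A's outer loop when expr1 does not occur at i
theorem pvOuter_miss (cs : List Char) (i : Nat) (hi : i < cs.length)
    (hm : ¬ pvExpr1 <+: cs.drop i) : pvAOuter cs i = pvAOuter cs (i + 1) := by
  conv_lhs => rw [pvAOuter]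
  rw [dif_pos hi, if_neg (fun heq => hm (List.prefix_iff_eq_take.2 heq.symm))]

-- if no occurrence of expr2 at or after j, A's inner loop returns none
theorem pvInner_all_none (cs : List Char) (i : Nat) :
    ∀ n j, cs.length - j ≤ n → (∀ k, j ≤ k → ¬ pvExpr2 <+: cs.drop k) → pvAInner cs i j = none := by
  intro n
  induction n with
  | zero =>
    intro j hn _; unfold pvAInner
    rw [dif_neg (by omega)]
  | succ n ih =>
    intro j hn hno
    by_cases hj : j < cs.length
    · rw [pvInner_miss cs i j hj (hno j le_rfl)]
      exact ih (j + 1) (by omega) (fun k hk => hno k (by omega))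
    · unfold pvAInner; rw [dif_neg hj]

-- A's inner loop skips any stretch with no occurrence of expr2
theorem pvInner_skip (cs : List Char) (i : Nat) :
    ∀ n j j', j' - j ≤ n → j ≤ j' → j' ≤ cs.length →
      (∀ k, j ≤ k → k < j' → ¬ pvExpr2 <+: cs.drop k) → pvAInner cs i j = pvAInner cs i j' := by
  intro n
  induction n with
  | zero =>
    intro j j' h1 h2 _ _
    obtain rfl : j = j' := by omega
    rfl
  | succ n ih =>
    intro j j' h1 h2 h3 hno
    rcases Nat.eq_or_lt_of_le h2 with he | hlt
    · rw [he]
    · rw [pvInner_miss cs i j (by omega) (hno j le_rfl hlt)]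
      exact ih (j + 1) j' (by omega) (by omega) h3 (fun k hk hk' => hno k (by omega) hk')

-- A's inner loop at an occurrence of expr2 returns the spliced text
theorem pvInner_hit (cs : List Char) (i j : Nat) (hj : j < cs.length)
    (h : pvExpr2 <+: cs.drop j) :
    pvAInner cs i j = some (cs.take i ++ cs.drop (j + pvExpr2.length)) := by
  unfold pvAInner
  rw [dif_pos hj, if_pos (List.prefix_iff_eq_take.1 h).symm]

-- if no occurrence of expr2 at or after t, A's outer loop from any i with t ≤ i + 18 returns none
theorem pvOuter_none (cs : List Char) (t : Nat)
    (hno : ∀ k, t ≤ k → ¬ pvExpr2 <+: cs.drop k) :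
    ∀ n i, cs.length - i ≤ n → t ≤ i + pvExpr1.length → pvAOuter cs i = none := by
  intro n
  induction n with
  | zero => intro i hn _; unfold pvAOuter; rw [dif_neg (by omega)]
  | succ n ih =>
    intro i hn ht
    by_cases hi : i < cs.length
    · have hrec : pvAOuter cs (i + 1) = none := ih (i + 1) (by omega) (by omega)
      by_cases hp : pvExpr1 <+: cs.drop i
      · conv_lhs => rw [pvAOuter]
        rw [dif_pos hi, if_pos (List.prefix_iff_eq_take.1 hp).symm,
          pvInner_all_none cs i (cs.length) (i + pvExpr1.length) (by omega)
            (fun k hk => hno k (by omega)), hrec]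
      · rw [pvOuter_miss cs i hi hp]; exact hrec
    · unfold pvAOuter; rw [dif_neg hi]

-- A's outer loop skips any stretch with no occurrence of expr1
theorem pvOuter_skip (cs : List Char) :
    ∀ n i i', i' - i ≤ n → i ≤ i' → i' ≤ cs.length →
      (∀ k, i ≤ k → k < i' → ¬ pvExpr1 <+: cs.drop k) → pvAOuter cs i = pvAOuter cs i' := by
  intro n
  induction n with
  | zero =>
    intro i i' h1 h2 _ _
    obtain rfl : i = i' := by omega
    rfl
  | succ n ih =>
    intro i i' h1 h2 h3 hno
    rcases Nat.eq_or_lt_of_le h2 with he | hlt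
    · rw [he]
    · rw [pvOuter_miss cs i (by omega) (hno i le_rfl hlt)]
      exact ih (i + 1) i' (by omega) (by omega) h3 (fun k hk hk' => hno k (by omega) hk')

-- if expr1 never occurs, A's outer loop returns none
theorem pvOuter_noH1 (cs : List Char) (hno : ∀ k, ¬ pvExpr1 <+: cs.drop k) :
    ∀ n i, cs.length - i ≤ n → pvAOuter cs i = none := by
  intro n
  induction n with
  | zero => intro i hn; unfold pvAOuter; rw [dif_neg (by omega)]
  | succ n ih =>
    intro i hn
    by_cases hi : i < cs.length
    · rw [pvOuter_miss cs i hi (hno i)]; exact ih (i + 1) (by omega)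
    · unfold pvAOuter; rw [dif_neg hi]

-- ---------- B-side lemmas (the one-pass automaton) ----------

-- the automaton invariant: k is the LONGEST prefix of the pattern that is a suffix of
-- the consumed text (bounded by the pattern length)
def pvGood (P l : List Char) (k : Nat) : Prop :=
  P.take k <:+ l ∧ k ≤ P.length ∧ ∀ m, m ≤ P.length → P.take m <:+ l → m ≤ k

theorem pvGood_nil (P : List Char) : pvGood P [] 0 := by
  refine ⟨by simp, Nat.zero_le _, fun m hm hs => ?_⟩
  have h0 : P.take m = [] := List.suffix_nil.mp hs
  have := congrArg List.length h0
  rw [List.length_take] at this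
  simp only [List.length_nil] at this
  omega

-- appending the same char preserves suffixes
theorem pvSuffix_snoc {t l : List Char} (c : Char) (h : t <:+ l) : t ++ [c] <:+ l ++ [c] := by
  obtain ⟨u, rfl⟩ := h
  exact ⟨u, by simp⟩

-- peeling the last char off a suffix
theorem pvSuffix_snoc_elim {t l : List Char} {a c : Char} (h : t ++ [a] <:+ l ++ [c]) :
    a = c ∧ t <:+ l := by
  rw [← List.reverse_prefix, List.reverse_append, List.reverse_append] at h
  simp only [List.reverse_singleton, List.singleton_append] at h
  rw [List.cons_prefix_cons] at h
  exact ⟨h.1, List.reverse_prefix.mp h.2⟩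

theorem pvTake_succ_getD (P : List Char) (k : Nat) (h : k < P.length) :
    P.take (k + 1) = P.take k ++ [P.getD k ' '] := by
  rw [List.take_succ, List.getD_eq_getElem P ' ' h]
  simp [List.getElem?_eq_getElem h]

-- a shorter suffix is a suffix of a longer suffix
theorem pvSuffix_of_suffix_le {t s l : List Char} (ht : t <:+ l) (hs : s <:+ l)
    (hlen : t.length ≤ s.length) : t <:+ s := by
  rw [← List.reverse_prefix] at ht hs ⊢
  exact List.prefix_of_prefix_length_le ht hs (by simpa)

-- if a nonempty proper prefix of P is a suffix of a longer prefix of P, the first char of P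
-- recurs inside P
theorem pvOverlap (P : List Char) (a k : Nat) (ha : 0 < a) (hak : a < k) (hk : k ≤ P.length)
    (h : P.take a <:+ P.take k) : P.getD (k - a) ' ' = P.getD 0 ' ' := by
  obtain ⟨u, hu⟩ := h
  have hlu : u.length = k - a := by
    have := congrArg List.length hu
    simp [Nat.min_eq_left (le_trans (le_of_lt hak) hk), Nat.min_eq_left hk] at this
    omega
  rw [List.getD_eq_getElem _ ' ' (by omega), List.getD_eq_getElem _ ' ' (by omega)]
  have hlt : k - a < (List.take k P).length := by rw [List.length_take]; omega
  have e1 : P[k - a]'(by omega) = (List.take k P)[k - a]'hlt := (List.getElem_take).symm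
  have e2 : (List.take k P)[k - a]'hlt = (u ++ List.take a P)[k - a]'(hu ▸ hlt) :=
    List.getElem_of_eq hu.symm hlt
  have e3 : (u ++ List.take a P)[k - a]'(hu ▸ hlt) = (List.take a P)[k - a - u.length]'(by
      rw [List.length_take]
      have := (hu ▸ hlt)
      rw [List.length_append, List.length_take] at this
      omega) :=
    List.getElem_append_right (by omega)
  have e4 : (List.take a P)[k - a - u.length]'(by rw [List.length_take]; omega)
      = P[0]'(by omega) := by
    have h00 : k - a - u.length = 0 := by omega
    simp only [h00]
    exact List.getElem_take
  exact e1.trans (e2.trans (e3.trans e4))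

-- the automaton's k-update preserves the invariant
theorem pvGood_step (P l : List Char) (k : Nat) (c : Char)
    (huniq : ∀ i, 0 < i → i < P.length → P.getD i ' ' ≠ P.getD 0 ' ')
    (hG : pvGood P l k) (hk : k < P.length) :
    pvGood P (l ++ [c])
      (if c = P.getD k ' ' then k + 1 else if c = P.getD 0 ' ' then 1 else 0) := by
  obtain ⟨hsuf, hkle, hmax⟩ := hG
  by_cases h1 : c = P.getD k ' '
  · rw [if_pos h1]
    refine ⟨?_, by omega, ?_⟩
    · rw [pvTake_succ_getD P k hk, ← h1]
      exact pvSuffix_snoc c hsuf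
    · intro m hm hs
      match m with
      | 0 => omega
      | mm + 1 =>
        rw [pvTake_succ_getD P mm (by omega)] at hs
        obtain ⟨-, hs2⟩ := pvSuffix_snoc_elim hs
        have := hmax mm (by omega) hs2
        omega
  · rw [if_neg h1]
    have hmism : ∀ m, m ≤ P.length → P.take m <:+ l ++ [c] → 0 < m →
        P.getD (m - 1) ' ' = c ∧ m - 1 ≤ k ∧ m - 1 ≠ k := by
      intro m hm hs hpos
      match m, hpos with
      | mm + 1, _ =>
        rw [pvTake_succ_getD P mm (by omega)] at hs
        obtain ⟨hc, hs2⟩ := pvSuffix_snoc_elim hs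
        refine ⟨by simpa using hc, by simpa using hmax mm (by omega) hs2, ?_⟩
        intro he
        simp at he
        subst he
        exact h1 hc.symm
    by_cases h2 : c = P.getD 0 ' '
    · rw [if_pos h2]
      refine ⟨?_, by omega, ?_⟩
      · have : P.take 1 = [c] := by
          rw [pvTake_succ_getD P 0 (by omega)]
          simp [h2]
        rw [this]
        exact ⟨l, rfl⟩
      · intro m hm hs
        by_contra hgt
        push_neg at hgt
        obtain ⟨hc, hle, hne⟩ := hmism m hm hs (by omega)
        -- so 2 ≤ m, m - 1 < k, and P.take (m-1) <:+ l alongside P.take k <:+ l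
        have hmm : 0 < m - 1 := by omega
        have hlt : m - 1 < k := by omega
        have hsub : P.take (m - 1) <:+ P.take k := by
          have hs2 : P.take (m - 1) <:+ l := by
            match m with
            | mm + 1 =>
              rw [pvTake_succ_getD P mm (by omega)] at hs
              simpa using (pvSuffix_snoc_elim hs).2
        
          exact pvSuffix_of_suffix_le hs2 hsuf
            (by simp [Nat.min_eq_left (by omega : m - 1 ≤ P.length),
                      Nat.min_eq_left (le_of_lt hk)]; omega)
        have := pvOverlap P (m - 1) k hmm hlt (le_of_lt hk) hsub
        exact huniq (k - (m - 1)) (by omega) (by omega) this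
    · rw [if_neg h2]
      refine ⟨by simp, Nat.zero_le _, ?_⟩
      intro m hm hs
      by_contra hgt
      push_neg at hgt
      obtain ⟨hc, hle, hne⟩ := hmism m hm hs (by omega)
      rcases Nat.eq_zero_or_pos (m - 1) with h0 | hpos
      · rw [h0] at hc; exact h2 hc.symm
      · have hlt : m - 1 < k := by omega
        have hsub : P.take (m - 1) <:+ P.take k := by
          have hs2 : P.take (m - 1) <:+ l := by
            match m with
            | mm + 1 =>
              rw [pvTake_succ_getD P mm (by omega)] at hs
              simpa using (pvSuffix_snoc_elim hs).2
          exact pvSuffix_of_suffix_le hs2 hsuf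
            (by simp [Nat.min_eq_left (by omega : m - 1 ≤ P.length),
                      Nat.min_eq_left (le_of_lt hk)]; omega)
        have := pvOverlap P (m - 1) k hpos hlt (le_of_lt hk) hsub
        exact huniq (k - (m - 1)) (by omega) (by omega) this

theorem pvUniq1 : ∀ i, 0 < i → i < pvExpr1.length → pvExpr1.getD i ' ' ≠ pvExpr1.getD 0 ' ' := by
  intro i h1 h2
  rw [pvE1len] at h2
  interval_cases i <;> decide

theorem pvUniq2 : ∀ i, 0 < i → i < pvExpr2.length → pvExpr2.getD i ' ' ≠ pvExpr2.getD 0 ' ' := by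
  intro i h1 h2
  rw [pvE2len] at h2
  interval_cases i <;> decide

-- a suffix of cs.take n re-assembled: cs.take (n - t.length) ++ t = cs.take n
theorem pvTake_reassemble {cs t : List Char} {n : Nat} (h : t <:+ cs.take n)
    (hn : n ≤ cs.length) : cs.take (n - t.length) ++ t = cs.take n := by
  obtain ⟨u, hu⟩ := h
  have hlen : u.length = n - t.length := by
    have := congrArg List.length hu
    simp [Nat.min_eq_left hn] at this
    omega
  have hu2 : u = cs.take (n - t.length) := by
    have : (u ++ t).take u.length = u := by simp
    rw [hu] at this
    rw [← this, List.take_take, hlen, Nat.min_eq_left (by omega)]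
  rw [← hu2, hu]

-- a full-pattern suffix of cs.take n is an occurrence at n - |P|
theorem pvOcc_of_suffix_take {cs P : List Char} {n : Nat} (h : P <:+ cs.take n)
    (hn : n ≤ cs.length) (hP : P.length ≤ n) : P <+: cs.drop (n - P.length) := by
  have hre := pvTake_reassemble h hn
  refine ⟨cs.drop n, ?_⟩
  have hlen1 : (cs.take (n - P.length)).length = n - P.length := by
    rw [List.length_take]; omega
  have h1 : (cs.take n).drop (n - P.length) = P := by
    rw [← hre, List.drop_append_of_le_length (le_of_eq hlen1.symm)]
    rw [List.drop_eq_nil_of_le (le_of_eq hlen1), List.nil_append]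
  calc P ++ cs.drop n = (cs.take n).drop (n - P.length) ++ cs.drop n := by rw [h1]
    _ = (cs.take n ++ cs.drop n).drop (n - P.length) := by
        rw [List.drop_append_of_le_length (by rw [List.length_take]; omega)]
    _ = cs.drop (n - P.length) := by rw [List.take_append_drop]

-- pvStep specialised to each state
theorem pvStep_eq0 (out : List Char) (k : Nat) (c : Char) :
    pvStep (out, k, 0) c =
      if c = pvExpr1.getD k ' ' then
        (if k + 1 = pvExpr1.length then (out, 0, 1) else (out, k + 1, 0))
      else if c = pvExpr1.getD 0 ' ' then (out ++ pvExpr1.take k, 1, 0)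
      else (out ++ pvExpr1.take k ++ [c], 0, 0) := by
  simp [pvStep]

theorem pvStep_eq1 (out : List Char) (k : Nat) (c : Char) :
    pvStep (out, k, 1) c =
      if c = pvExpr2.getD k ' ' then
        (if k + 1 = pvExpr2.length then (out, 0, 2) else (out, k + 1, 1))
      else if c = pvExpr2.getD 0 ' ' then (out, 1, 1)
      else (out, 0, 1) := by
  simp [pvStep]

theorem pvStep_eq2 (out : List Char) (k : Nat) (c : Char) :
    pvStep (out, k, 2) c = (out ++ [c], k, 2) := by
  simp [pvStep]

-- phase-0 invariant: while no OPEN occurrence has ended, state is (emitted, k, 0)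
-- with k the longest OPEN-prefix suffix and emitted = all but those k chars
theorem pvPhase0 (cs : List Char) :
    ∀ n, n ≤ cs.length → (∀ p, p + 18 ≤ n → ¬ pvExpr1 <+: cs.drop p) →
    ∃ k, (cs.take n).foldl pvStep ([], 0, 0) = (cs.take (n - k), k, 0)
      ∧ pvGood pvExpr1 (cs.take n) k ∧ k < 18 := by
  intro n
  induction n with
  | zero => exact fun _ _ => ⟨0, by simp [pvGood_nil]⟩
  | succ n ih =>
    intro hn hno
    obtain ⟨k, hfold, hG, hk⟩ := ih (by omega) (fun p hp => hno p (by omega))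
    have hcn : n < cs.length := by omega
    set c := cs[n] with hc
    have htake : cs.take (n + 1) = cs.take n ++ [c] := by
      rw [List.take_add_one, List.getElem?_eq_getElem hcn]
      simp [hc]
    have hknew := pvGood_step pvExpr1 (cs.take n) k c pvUniq1 hG (by rw [pvE1len]; omega)
    rw [htake, List.foldl_append, hfold, List.foldl_cons, List.foldl_nil, pvStep_eq0]
    by_cases h1 : c = pvExpr1.getD k ' '
    · by_cases h18 : k + 1 = 18
      · -- would complete an occurrence ending at n+1: contradicts hno
        exfalso
        rw [if_pos h1, h18] at hknew
        have hsuf : pvExpr1 <:+ cs.take n ++ [c] := by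
          have := hknew.1
          rwa [← pvE1len, List.take_length] at this
        rw [← htake] at hsuf
        have h18n : 18 ≤ n + 1 := by
          have := hsuf.length_le
          rw [pvE1len, List.length_take] at this
          omega
        have hocc := pvOcc_of_suffix_take hsuf (by omega) (by rw [pvE1len]; omega)
        rw [pvE1len] at hocc
        exact hno (n + 1 - 18) (by omega) hocc
      · refine ⟨k + 1, ?_, ?_, ?_⟩
        · rw [if_pos h1, if_neg (by rw [pvE1len]; omega : ¬ k + 1 = pvExpr1.length),
            show n + 1 - (k + 1) = n - k by omega]
        · rw [if_pos h1] at hknew; exact hknew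
        · omega
    · have hre : cs.take (n - k) ++ pvExpr1.take k = cs.take n := by
        have := pvTake_reassemble hG.1 (by omega : n ≤ cs.length)
        rwa [List.length_take, Nat.min_eq_left (by rw [pvE1len]; omega)] at this
      by_cases h2 : c = pvExpr1.getD 0 ' '
      · refine ⟨1, ?_, ?_, by omega⟩
        · rw [if_neg h1, if_pos h2, hre, show n + 1 - 1 = n by omega]
        · rw [if_neg h1, if_pos h2] at hknew; exact hknew
      · refine ⟨0, ?_, ?_, by omega⟩
        · rw [if_neg h1, if_neg h2, hre, Nat.sub_zero, htake]
        · rw [if_neg h1, if_neg h2] at hknew; exact hknew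

-- phase-0 exit: at the end of the first OPEN occurrence the automaton switches to state 1
theorem pvPhase0_exit (cs : List Char) (i0 : Nat) (hi : i0 + 18 ≤ cs.length)
    (hpre : pvExpr1 <+: cs.drop i0) (hmin : ∀ p, p < i0 → ¬ pvExpr1 <+: cs.drop p) :
    (cs.take (i0 + 18)).foldl pvStep ([], 0, 0) = (cs.take i0, 0, 1) := by
  obtain ⟨k, hfold, hG, hk⟩ := pvPhase0 cs (i0 + 17) (by omega)
    (fun p hp => hmin p (by omega))
  have heq : (cs.drop i0).take pvExpr1.length = pvExpr1 := (List.prefix_iff_eq_take.1 hpre).symm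
  have h17 : pvExpr1.take 17 <:+ cs.take (i0 + 17) := by
    rw [List.take_add]
    have ht : (cs.drop i0).take 17 = pvExpr1.take 17 := by
      rw [← heq, List.take_take]
      congr 1
    rw [ht]
    exact ⟨_, rfl⟩
  have hk17 : k = 17 := by
    have := hG.2.2 17 (by rw [pvE1len]; omega) h17
    omega
  subst hk17
  have hcn : i0 + 17 < cs.length := by omega
  have hc17 : cs[i0 + 17] = pvExpr1.getD 17 ' ' := by
    rw [List.getD_eq_getElem _ ' ' (by rw [pvE1len]; omega)]
    have h1 : pvExpr1[17]'(by rw [pvE1len]; omega)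
        = ((cs.drop i0).take pvExpr1.length)[17]'(by rw [heq, pvE1len]; omega) :=
      List.getElem_of_eq heq.symm _
    rw [h1, List.getElem_take, List.getElem_drop]
  have htake : cs.take (i0 + 18) = cs.take (i0 + 17) ++ [cs[i0 + 17]] := by
    rw [show i0 + 18 = (i0 + 17) + 1 by omega, List.take_add_one, List.getElem?_eq_getElem hcn]
    simp
  rw [htake, List.foldl_append, hfold, List.foldl_cons, List.foldl_nil, pvStep_eq0]
  rw [if_pos hc17, if_pos (by rw [pvE1len]), show i0 + 17 - 17 = i0 by omega]

-- phase-1 invariant: scanning for CLOSE, out stays fixed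
theorem pvPhase1 (O : List Char) (s : List Char) :
    ∀ r, r ≤ s.length → (∀ q, q + 5 ≤ r → ¬ pvExpr2 <+: s.drop q) →
    ∃ k, (s.take r).foldl pvStep (O, 0, 1) = (O, k, 1)
      ∧ pvGood pvExpr2 (s.take r) k ∧ k < 5 := by
  intro r
  induction r with
  | zero => exact fun _ _ => ⟨0, by simp [pvGood_nil]⟩
  | succ n ih =>
    intro hn hno
    obtain ⟨k, hfold, hG, hk⟩ := ih (by omega) (fun q hq => hno q (by omega))
    have hcn : n < s.length := by omega
    set c := s[n] with hc
    have htake : s.take (n + 1) = s.take n ++ [c] := by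
      rw [List.take_add_one, List.getElem?_eq_getElem hcn]
      simp [hc]
    have hknew := pvGood_step pvExpr2 (s.take n) k c pvUniq2 hG (by rw [pvE2len]; omega)
    rw [htake, List.foldl_append, hfold, List.foldl_cons, List.foldl_nil, pvStep_eq1]
    by_cases h1 : c = pvExpr2.getD k ' '
    · by_cases h5 : k + 1 = 5
      · exfalso
        rw [if_pos h1, h5] at hknew
        have hsuf : pvExpr2 <:+ s.take n ++ [c] := by
          have := hknew.1
          rwa [← pvE2len, List.take_length] at this
        rw [← htake] at hsuf
        have h5n : 5 ≤ n + 1 := by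
          have := hsuf.length_le
          rw [pvE2len, List.length_take] at this
          omega
        have hocc := pvOcc_of_suffix_take hsuf (by omega) (by rw [pvE2len]; omega)
        rw [pvE2len] at hocc
        exact hno (n + 1 - 5) (by omega) hocc
      · refine ⟨k + 1, ?_, ?_, ?_⟩
        · rw [if_pos h1, if_neg (by rw [pvE2len]; omega : ¬ k + 1 = pvExpr2.length)]
        · rw [if_pos h1] at hknew; exact hknew
        · omega
    · by_cases h2 : c = pvExpr2.getD 0 ' '
      · refine ⟨1, ?_, ?_, by omega⟩
        · rw [if_neg h1, if_pos h2]
        · rw [if_neg h1, if_pos h2] at hknew; exact hknew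
      · refine ⟨0, ?_, ?_, by omega⟩
        · rw [if_neg h1, if_neg h2]
        · rw [if_neg h1, if_neg h2] at hknew; exact hknew

-- phase-1 exit: at the end of the first CLOSE occurrence the automaton switches to state 2
theorem pvPhase1_exit (O : List Char) (s : List Char) (q0 : Nat) (hq : q0 + 5 ≤ s.length)
    (hpre : pvExpr2 <+: s.drop q0) (hmin : ∀ q, q < q0 → ¬ pvExpr2 <+: s.drop q) :
    (s.take (q0 + 5)).foldl pvStep (O, 0, 1) = (O, 0, 2) := by
  obtain ⟨k, hfold, hG, hk⟩ := pvPhase1 O s (q0 + 4) (by omega)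
    (fun q hqq => hmin q (by omega))
  have heq : (s.drop q0).take pvExpr2.length = pvExpr2 := (List.prefix_iff_eq_take.1 hpre).symm
  have h4 : pvExpr2.take 4 <:+ s.take (q0 + 4) := by
    rw [List.take_add]
    have ht : (s.drop q0).take 4 = pvExpr2.take 4 := by
      rw [← heq, List.take_take]
      congr 1
    rw [ht]
    exact ⟨_, rfl⟩
  have hk4 : k = 4 := by
    have := hG.2.2 4 (by rw [pvE2len]; omega) h4
    omega
  subst hk4
  have hcn : q0 + 4 < s.length := by omega
  have hc4 : s[q0 + 4] = pvExpr2.getD 4 ' ' := by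
    rw [List.getD_eq_getElem _ ' ' (by rw [pvE2len]; omega)]
    have h1 : pvExpr2[4]'(by rw [pvE2len]; omega)
        = ((s.drop q0).take pvExpr2.length)[4]'(by rw [heq, pvE2len]; omega) :=
      List.getElem_of_eq heq.symm _
    rw [h1, List.getElem_take, List.getElem_drop]
  have htake : s.take (q0 + 5) = s.take (q0 + 4) ++ [s[q0 + 4]] := by
    rw [show q0 + 5 = (q0 + 4) + 1 by omega, List.take_add_one, List.getElem?_eq_getElem hcn]
    simp
  rw [htake, List.foldl_append, hfold, List.foldl_cons, List.foldl_nil, pvStep_eq1]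
  rw [if_pos hc4, if_pos (by rw [pvE2len])]

-- phase 2 copies the remainder verbatim
theorem pvPhase2 (t : List Char) : ∀ (O : List Char) (k : Nat),
    t.foldl pvStep (O, k, 2) = (O ++ t, k, 2) := by
  induction t with
  | nil => intro O k; simp
  | cons c t ih =>
    intro O k
    rw [List.foldl_cons, pvStep_eq2, ih]
    simp

-- ===== VERDICT (by name: the statement is the Claim_ definition above) =====
theorem removeTitle_spec : Claim_equal_removeTitle := by
  intro text _
  unfold Spec_removeTitle removeTitle removeTitle_alt
  set cs := text.toList with hcs
  by_cases h1 : ∃ p, pvExpr1 <+: cs.drop p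
  case neg =>
    -- no opening tag anywhere: both return text
    push_neg at h1
    rw [pvOuter_noH1 cs h1 cs.length 0 (by omega)]
    obtain ⟨k, hfold, -, -⟩ := pvPhase0 cs cs.length le_rfl
      (fun p hp hocc => h1 p hocc)
    rw [List.take_length] at hfold
    simp [hfold]
  case pos =>
    classical
    let i0 := Nat.find h1
    have hpre1 : pvExpr1 <+: cs.drop i0 := Nat.find_spec h1
    have hmin1 : ∀ p, p < i0 → ¬ pvExpr1 <+: cs.drop p := fun p hp => Nat.find_min h1 hp
    have hi0len : i0 + 18 ≤ cs.length := by
      have := hpre1.length_le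
      rw [pvE1len, List.length_drop] at this
      omega
    set e := i0 + 18 with he
    set s := cs.drop e with hs
    have hskipA : pvAOuter cs 0 = pvAOuter cs i0 :=
      pvOuter_skip cs i0 0 i0 (by omega) (by omega) (by omega)
        (fun k _ hk => hmin1 k hk)
    have hfold0 : (cs.take e).foldl pvStep ([], 0, 0) = (cs.take i0, 0, 1) :=
      pvPhase0_exit cs i0 hi0len hpre1 hmin1
    have hsplit : cs.foldl pvStep ([], 0, 0) = s.foldl pvStep (cs.take i0, 0, 1) := by
      conv_lhs => rw [← List.take_append_drop e cs]
      rw [List.foldl_append, hfold0]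
    by_cases h2 : ∃ q, pvExpr2 <+: s.drop q
    case neg =>
      -- no closing tag after the opening tag: both return text
      push_neg at h2
      -- A
      have hno2 : ∀ k, e ≤ k → ¬ pvExpr2 <+: cs.drop k := by
        intro k hk hp
        have : cs.drop k = s.drop (k - e) := by
          rw [hs, List.drop_drop]
          congr 1
          omega
        rw [this] at hp
        exact h2 (k - e) hp
      have hiA : pvAInner cs i0 (i0 + pvExpr1.length) = none :=
        pvInner_all_none cs i0 cs.length _ (by omega)
          (fun k hk => hno2 k (by rw [pvE1len] at hk; omega))
      have houter : pvAOuter cs i0 = none := by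
        conv_lhs => rw [pvAOuter]
        rw [dif_pos (by omega), if_pos (List.prefix_iff_eq_take.1 hpre1).symm, hiA,
          pvOuter_none cs e hno2 cs.length (i0 + 1) (by omega) (by rw [pvE1len]; omega)]
      rw [hskipA, houter]
      -- B
      obtain ⟨k, hfold, -, -⟩ := pvPhase1 (cs.take i0) s s.length le_rfl
        (fun q hq hocc => h2 q hocc)
      rw [List.take_length] at hfold
      simp [hsplit, hfold]
    case pos =>
      let q0 := Nat.find h2
      have hpre2 : pvExpr2 <+: s.drop q0 := Nat.find_spec h2
      have hmin2 : ∀ q, q < q0 → ¬ pvExpr2 <+: s.drop q := fun q hq => Nat.find_min h2 hq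
      have hq0len : q0 + 5 ≤ s.length := by
        have := hpre2.length_le
        rw [pvE2len, List.length_drop] at this
        omega
      have hslen : s.length = cs.length - e := by rw [hs, List.length_drop]
      set j0 := e + q0 with hj0
      have hpre2' : pvExpr2 <+: cs.drop j0 := by
        rw [hj0, ← List.drop_drop] at *
        exact hpre2
      have hmin2' : ∀ k, e ≤ k → k < j0 → ¬ pvExpr2 <+: cs.drop k := by
        intro k hk hkj hp
        have : cs.drop k = s.drop (k - e) := by
          rw [hs, List.drop_drop]; congr 1; omega
        rw [this] at hp
        exact hmin2 (k - e) (by omega) hp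
      -- A's value
      have hinner : pvAInner cs i0 (i0 + pvExpr1.length) =
          some (cs.take i0 ++ cs.drop (j0 + pvExpr2.length)) := by
        rw [pvE1len]
        rw [pvInner_skip cs i0 cs.length (i0 + 18) j0 (by omega) (by omega) (by omega)
          (fun k hk hk' => hmin2' k hk hk')]
        exact pvInner_hit cs i0 j0 (by omega) hpre2'
      have houter : pvAOuter cs i0 =
          some (cs.take i0 ++ cs.drop (j0 + pvExpr2.length)) := by
        conv_lhs => rw [pvAOuter]
        rw [dif_pos (by omega), if_pos (List.prefix_iff_eq_take.1 hpre1).symm, hinner]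
      rw [hskipA, houter]
      -- B's value
      have hfold1 : (s.take (q0 + 5)).foldl pvStep (cs.take i0, 0, 1) = (cs.take i0, 0, 2) :=
        pvPhase1_exit (cs.take i0) s q0 hq0len hpre2 hmin2
      have hsplit2 : s.foldl pvStep (cs.take i0, 0, 1)
          = (cs.take i0 ++ s.drop (q0 + 5), 0, 2) := by
        conv_lhs => rw [← List.take_append_drop (q0 + 5) s]
        rw [List.foldl_append, hfold1, pvPhase2]
      have hdropeq : s.drop (q0 + 5) = cs.drop (j0 + pvExpr2.length) := by
        rw [pvE2len, hs, List.drop_drop]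
        congr 1
      rw [hsplit, hsplit2, hdropeq]
      simp
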